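-- pv_equiv track=rewrite | github.com/ReFLEX-Lab-York/MRWS_MultiRobot_Warehouse_Scheduling | simu/src/main.py | _count_error_types
-- ===== SOURCE A (Python) =====
-- def _count_error_types(errors):
--     error_types = [len(errors), 0, 0, 0]
--     for error_message in errors:
--         message = str(error_message)
--         if "collided" in message:
--             error_types[1] += 1
--         if "limit" in message:
--             error_types[3] += 1
--         if "empty" in message or "violated" in message:
--             error_types[2] += 1
--     return error_types
-- ===== SOURCE B (Python) =====
-- def _count_error_types(errors):
--     messages = [str(e) for e in errors]
--     return [
--         len(errors),
--         sum(1 for m in messages if "collided" in m),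
--         sum(1 for m in messages if "empty" in m or "violated" in m),
--         sum(1 for m in messages if "limit" in m),
--     ]
-- ===== Notes on version B (the rewrite author's own statement) =====
-- stated objective: idiomatic
-- what changed: Replaces the single branched accumulating loop over a mutable 4-slot list with a directly-constructed result list: the length plus three independent full-list counting comprehensions, one per category.
import Mathlib
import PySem

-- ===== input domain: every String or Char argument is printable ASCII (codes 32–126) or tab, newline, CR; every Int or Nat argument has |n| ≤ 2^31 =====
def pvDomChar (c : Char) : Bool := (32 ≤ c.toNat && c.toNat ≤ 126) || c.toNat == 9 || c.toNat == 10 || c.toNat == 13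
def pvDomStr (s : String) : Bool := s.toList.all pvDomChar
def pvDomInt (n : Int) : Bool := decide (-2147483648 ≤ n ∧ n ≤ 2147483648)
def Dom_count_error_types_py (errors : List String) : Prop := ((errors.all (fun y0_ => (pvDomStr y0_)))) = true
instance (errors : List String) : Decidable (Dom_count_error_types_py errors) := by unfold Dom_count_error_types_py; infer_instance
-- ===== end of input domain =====

-- B rebuilds the result directly: length plus three independent category counts, instead of A's single branched accumulating loop (objective: idiomatic).

-- ===== PORT A =====
-- A's loop body: increments slot 1 on "collided", slot 3 on "limit", slot 2 on "empty" or "violated";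
-- the mutable list slots [1],[2],[3] are carried as the fold state (c1, c2, c3).
def count_error_types_py (errors : List String) : List Int :=
  let st := errors.foldl
    (fun (st : Int × Int × Int) (error_message : String) =>
      let message := error_message  -- str(s) on a str is the identity
      let st := if PySem.Str.isIn "collided" message then (st.1 + 1, st.2.1, st.2.2) else st
      let st := if PySem.Str.isIn "limit" message then (st.1, st.2.1, st.2.2 + 1) else st
      let st := if PySem.Str.isIn "empty" message || PySem.Str.isIn "violated" message
                then (st.1, st.2.1 + 1, st.2.2) else st
      st)
    (0, 0, 0)
  [(errors.length : Int), st.1, st.2.1, st.2.2]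

-- ===== PORT B =====
def count_error_types_py_alt (errors : List String) : List Int :=
  let messages := errors.map (fun e => e)  -- str(e) on a str is the identity
  [(errors.length : Int),
   ((messages.filter (fun m => PySem.Str.isIn "collided" m)).length : Int),
   ((messages.filter (fun m => PySem.Str.isIn "empty" m || PySem.Str.isIn "violated" m)).length : Int),
   ((messages.filter (fun m => PySem.Str.isIn "limit" m)).length : Int)]

-- ===== PRECONDITION & SPEC =====
def Spec_count_error_types_py (errors : List String) (out : List Int) : Prop := out = count_error_types_py_alt errors
instance (errors : List String) (out : List Int) : Decidable (Spec_count_error_types_py errors out) := by unfold Spec_count_error_types_py; infer_instance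

-- ===== CLAIM (what is proved, stated in full; the proofs are below) =====
def Claim_equal_count_error_types_py : Prop := ∀ (errors : List String), Dom_count_error_types_py errors → Spec_count_error_types_py errors (count_error_types_py errors)

-- ===== LEMMAS AND PROOFS =====

-- the fold's state equals an offset plus the three per-category filter counts
theorem count_error_types_fold (errors : List String) (a b c : Int) :
    errors.foldl
      (fun (st : Int × Int × Int) (error_message : String) =>
        let message := error_message
        let st := if PySem.Str.isIn "collided" message then (st.1 + 1, st.2.1, st.2.2) else st
        let st := if PySem.Str.isIn "limit" message then (st.1, st.2.1, st.2.2 + 1) else st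
        let st := if PySem.Str.isIn "empty" message || PySem.Str.isIn "violated" message
                  then (st.1, st.2.1 + 1, st.2.2) else st
        st)
      (a, b, c)
    = (a + ((errors.filter (fun m => PySem.Str.isIn "collided" m)).length : Int),
       b + ((errors.filter (fun m => PySem.Str.isIn "empty" m || PySem.Str.isIn "violated" m)).length : Int),
       c + ((errors.filter (fun m => PySem.Str.isIn "limit" m)).length : Int)) := by
  induction errors generalizing a b c with
  | nil => simp
  | cons e es ih =>
      simp only [List.foldl_cons, List.filter_cons]
      split_ifs <;> simp_all [ih, Prod.ext_iff] <;> omega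

-- ===== VERDICT (by name: the statement is the Claim_ definition above) =====
theorem count_error_types_py_spec : Claim_equal_count_error_types_py := by
  intro errors _
  show _ = _
  simp only [count_error_types_py, count_error_types_py_alt, count_error_types_fold,
    List.map_id_fun', List.map_id']
  norm_num
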